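-- pv_equiv track=rewrite | github.com/BirkKarlsen/beam_dynamics_tools | beam_dynamics_tools/beam_profiles/bunch_profile_tools.py | find_batch_length
-- ===== SOURCE A (Python) =====
-- def find_batch_length(positions, bunch_spacing):
--     r'''
--     Finds the number of bunches in each batch and the number of batches.
--     The function assumes that all batches have the same length.
--
--     :param positions: The positions of all the bunches in the beam [ns]
--     :param bunch_spacing: The bunch spacing within a batch [ns]
--     :return: the number of bunches in each batch, number of batches
--     '''
--     n_batches = 1
--     batch_len = len(positions)
--     prev_pos = positions[0]
--
--     for i, pos in enumerate(positions):
--         if pos - prev_pos > 6 * bunch_spacing: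
--             if n_batches == 1:
--                 batch_len = i
--
--             n_batches += 1
--
--         prev_pos = pos
--
--     return batch_len, n_batches
-- ===== SOURCE B (Python) =====
-- def find_batch_length(positions, bunch_spacing):
--     # Chunk-stripping: repeatedly strip the leading batch off the list and count
--     # the strips, instead of a single stateful scan.  The reference predecessor
--     # for the very first comparison is the first bunch itself.
--     thr = 6 * bunch_spacing
--
--     def head_run(prev, chunk):
--         # length of the longest prefix of chunk whose elements each exceed
--         # their predecessor (starting from prev) by at most thr
--         k = 0
--         while k < len(chunk) and chunk[k] - prev <= thr:
--             prev = chunk[k]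
--             k += 1
--         return k
--
--     first_len = head_run(positions[0], positions)
--     n = 1
--     rest = positions[first_len:]
--     while rest:
--         rest = rest[1 + head_run(rest[0], rest[1:]):]
--         n += 1
--     return first_len, n
-- ===== Notes on version B (the rewrite author's own statement) =====
-- stated objective: alternative
-- what changed: Replaces A's single enumerated scan with n_batches/batch_len/prev_pos bookkeeping by chunk-stripping: a head_run helper measures the leading batch, then the loop repeatedly slices off one batch at a time and counts the strips.
import Mathlib
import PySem

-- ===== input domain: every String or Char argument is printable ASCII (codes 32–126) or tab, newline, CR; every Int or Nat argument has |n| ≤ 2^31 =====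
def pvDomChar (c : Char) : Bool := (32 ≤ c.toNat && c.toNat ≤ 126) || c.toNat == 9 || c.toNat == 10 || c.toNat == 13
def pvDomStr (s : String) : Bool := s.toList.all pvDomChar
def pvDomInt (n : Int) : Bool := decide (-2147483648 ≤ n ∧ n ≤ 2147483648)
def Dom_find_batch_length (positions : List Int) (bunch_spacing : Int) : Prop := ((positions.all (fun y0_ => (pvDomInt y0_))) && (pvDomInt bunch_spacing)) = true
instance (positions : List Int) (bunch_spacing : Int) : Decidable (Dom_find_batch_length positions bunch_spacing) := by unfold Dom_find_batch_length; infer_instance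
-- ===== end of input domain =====

-- B replaces A's single stateful scan by chunk-stripping: measure the leading batch with a
-- head-run helper, then repeatedly slice off one batch at a time and count the strips;
-- objective: alternative decomposition, same results.

-- ===== PORT A =====
def find_batch_length (positions : List Int) (bunch_spacing : Int) : Int × Int :=
  -- positions[0] raises IndexError on []; Pre_ excludes that input, so the .getD 0 is never used
  let prev_pos : Int := (PySem.List.pyGet? positions 0).getD 0
  let st := (PySem.List.enumerate positions 0).foldl
    (fun (st : Int × Int × Int) (ip : Int × Int) =>
      if ip.2 - st.2.2 > 6 * bunch_spacing then
        (st.1 + 1, (if st.1 = 1 then ip.1 else st.2.1), ip.2)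
      else (st.1, st.2.1, ip.2))
    ((1 : Int), ((positions.length : Int), prev_pos))
  (st.2.1, st.1)

-- ===== PORT B =====
-- Source B's head_run: while loop counting the leading run whose steps stay ≤ thr
def headRun (thr : Int) : Int → List Int → Nat
  | _, [] => 0
  | p, x :: xs => if x - p ≤ thr then 1 + headRun thr x xs else 0

-- Source B's outer while loop: strip one batch per iteration, counting strips
-- (rest[1 + head_run(rest[0], rest[1:]):] is a nonnegative slice = List.drop, exact here)
def stripLoop (thr : Int) : List Int → Int → Int
  | [], n => n
  | r :: rs, n => stripLoop thr ((r :: rs).drop (1 + headRun thr r rs)) (n + 1)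
termination_by rest _ => rest.length
decreasing_by simp [List.length_drop]

def find_batch_length_alt (positions : List Int) (bunch_spacing : Int) : Int × Int :=
  let thr := 6 * bunch_spacing
  -- positions[0] raises IndexError on []; Pre_ excludes that input, so the .getD 0 is never used
  let first_len := headRun thr ((PySem.List.pyGet? positions 0).getD 0) positions
  -- positions[first_len:] with first_len ≥ 0 is List.drop, exact here
  ((first_len : Int), stripLoop thr (positions.drop first_len) 1)

-- ===== PRECONDITION & SPEC =====
-- Pre_ excludes only the empty list, on which Python A raises IndexError at positions[0].
def Pre_find_batch_length (positions : List Int) (bunch_spacing : Int) : Prop := positions ≠ []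
instance (positions : List Int) (bunch_spacing : Int) : Decidable (Pre_find_batch_length positions bunch_spacing) := by unfold Pre_find_batch_length; infer_instance

def pvWitness_find_batch_length : List Int × Int := ([0, 1, 20, 21], 1)

def Spec_find_batch_length (positions : List Int) (bunch_spacing : Int) (out : Int × Int) : Prop := out = find_batch_length_alt positions bunch_spacing
instance (positions : List Int) (bunch_spacing : Int) (out : Int × Int) : Decidable (Spec_find_batch_length positions bunch_spacing out) := by unfold Spec_find_batch_length; infer_instance

-- ===== CLAIM (what is proved, stated in full; the proofs are below) =====
def Claim_equal_find_batch_length : Prop := ∀ (positions : List Int) (bunch_spacing : Int), Dom_find_batch_length positions bunch_spacing → Pre_find_batch_length positions bunch_spacing → Spec_find_batch_length positions bunch_spacing (find_batch_length positions bunch_spacing)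

-- ===== LEMMAS AND PROOFS =====

lemma getLast?_cons_getD (x p : Int) (xs : List Int) : ((x :: xs).getLast?).getD p = (xs.getLast?).getD x := by
  cases xs with
  | nil => rfl
  | cons y ys =>
    rw [List.getLast?_cons_cons]
    cases hgl : (y :: ys).getLast? with
    | none => simp at hgl
    | some a => rfl

-- the list of big-gap indices, scanned with previous element p and next index k
def gapsF (b : Int) : List Int → Int → Int → List Int
  | [], _, _ => []
  | x :: xs, p, k => if x - p > 6 * b then k :: gapsF b xs x (k + 1) else gapsF b xs x (k + 1)

-- number of big gaps in the chain starting at previous element p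
def gCount (b : Int) : List Int → Int → Nat
  | [], _ => 0
  | x :: xs, p => (if x - p > 6 * b then 1 else 0) + gCount b xs x

lemma foldA (b : Int) (xs : List Int) : ∀ (p k n bl : Int), 1 ≤ n →
    (PySem.List.enumerate xs k).foldl
      (fun (st : Int × Int × Int) (ip : Int × Int) =>
        if ip.2 - st.2.2 > 6 * b then
          (st.1 + 1, (if st.1 = 1 then ip.1 else st.2.1), ip.2)
        else (st.1, st.2.1, ip.2)) (n, bl, p)
    = (n + ((gapsF b xs p k).length : Int),
       (if n = 1 then (gapsF b xs p k).headD bl else bl), xs.getLastD p) := by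
  induction xs with
  | nil => intro p k n bl hn; simp [PySem.List.enumerate, gapsF]
  | cons x xs ih =>
    intro p k n bl hn
    rw [PySem.List.enumerate_cons, List.foldl_cons]
    by_cases h : x - p > 6 * b
    · simp only [h, if_true, gapsF]
      rw [ih x (k + 1) (n + 1) (if n = 1 then k else bl) (by omega)]
      have hne : ¬ (n + 1 = 1) := by omega
      simp only [hne, if_false, List.getLastD_cons]
      by_cases hn1 : n = 1 <;> simp [hn1] <;> ring_nf
    · simp only [h, if_false, gapsF]
      rw [ih x (k + 1) n bl hn]
      simp [getLast?_cons_getD]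

lemma gapsF_length (b : Int) (xs : List Int) : ∀ (p k : Int), (gapsF b xs p k).length = gCount b xs p := by
  induction xs with
  | nil => intro p k; simp [gapsF, gCount]
  | cons x xs ih =>
    intro p k
    by_cases h : x - p > 6 * b <;> simp [gapsF, gCount, h, ih x (k + 1)] <;> omega

lemma gapsF_headD (b : Int) (xs : List Int) : ∀ (p k : Int),
    (gapsF b xs p k).headD (k + (xs.length : Int)) = k + (headRun (6 * b) p xs : Int) := by
  induction xs with
  | nil => intro p k; simp [gapsF, headRun]
  | cons x xs ih =>
    intro p k
    by_cases h : x - p > 6 * b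
    · have h' : ¬ (x - p ≤ 6 * b) := by omega
      simp [gapsF, headRun, h, h']
    · have h' : x - p ≤ 6 * b := by omega
      simp only [gapsF, headRun, h, h', if_false, if_true]
      have : k + (((x :: xs).length : Nat) : Int) = (k + 1) + (xs.length : Int) := by
        simp; omega
      rw [this, ih x (k + 1)]
      push_cast; ring

lemma stripLoop_eq (b : Int) (xs : List Int) : ∀ (p : Int) (n : Int),
    stripLoop (6 * b) (xs.drop (headRun (6 * b) p xs)) n = n + (gCount b xs p : Int) := by
  induction xs with
  | nil =>
    intro p n
    rw [show List.drop (headRun (6 * b) p []) [] = ([] : List Int) from List.drop_nil,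
        stripLoop, gCount]
    simp
  | cons x xs ih =>
    intro p n
    by_cases h : x - p ≤ 6 * b
    · have h' : ¬ (x - p > 6 * b) := by omega
      simp only [headRun, h, if_true, gCount, h', if_false]
      rw [show (1 + headRun (6 * b) x xs) = (headRun (6 * b) x xs) + 1 by omega,
          List.drop_succ_cons, ih x n]
      simp
    · have h' : x - p > 6 * b := by omega
      simp only [headRun, h, if_false, gCount, h', if_true]
      rw [List.drop_zero]
      rw [stripLoop]
      rw [show (1 + headRun (6 * b) x xs) = (headRun (6 * b) x xs) + 1 by omega,
          List.drop_succ_cons, ih x (n + 1)]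
      push_cast; ring

-- ===== VERDICT (by name: the statement is the Claim_ definition above) =====
theorem find_batch_length_spec : Claim_equal_find_batch_length := by
  intro positions bs _ hpre
  unfold Spec_find_batch_length
  cases positions with
  | nil => exact absurd rfl hpre
  | cons x rest =>
    simp only [find_batch_length, find_batch_length_alt]
    rw [show (PySem.List.pyGet? (x :: rest) 0).getD 0 = x by
      simp [PySem.List.pyGet?, PySem.List.pyIdx?]]
    rw [foldA bs (x :: rest) x 0 1 (((x :: rest).length : Nat) : Int) (by omega)]
    have hh := gapsF_headD bs (x :: rest) x 0
    rw [zero_add, zero_add] at hh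
    have hs := stripLoop_eq bs (x :: rest) x 1
    rw [if_pos rfl, hh]
    dsimp only
    rw [hs, gapsF_length bs (x :: rest) x 0]
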